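-- pv_equiv track=rewrite | github.com/dimgatz98/prog_lang | luseis_thematwn/sliding.py | sliding
-- ===== SOURCE A (Python) =====
-- def sliding(A, K):
-- 	d = {}
-- 	for i in range(len(A) - K + 1):
-- 		if(sum(A[i:i+K]) in d):
-- 			d[sum(A[i:i+K])] += 1
-- 		else:
-- 			d[sum(A[i:i+K])] = 1
--
-- 	temp_max = -1
-- 	for k, v in d.items():
-- 		if(v > temp_max):
-- 			temp_max = v
-- 			temp_max_k = k
-- 		elif(v == temp_max):
-- 			if(k > temp_max_k):
-- 				temp_max_k = k
--
-- 	return (temp_max_k, temp_max)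
-- ===== SOURCE B (Python) =====
-- def sliding(A, K):
--     s = sum(A[i] for i in range(K))
--     counts = {s: 1}
--     for i in range(len(A) - K):
--         s += A[i + K] - A[i]
--         counts[s] = counts.get(s, 0) + 1
--     best_k, best_v = max(counts.items(), key=lambda kv: (kv[1], kv[0]))
--     return (best_k, best_v)
-- ===== Notes on version B (the rewrite author's own statement) =====
-- stated objective: faster
-- what changed: B maintains the window sum incrementally (s += A[i+K]-A[i]) instead of re-summing each K-slice, counts with dict.get, and picks the answer with max over (count, sum) instead of a hand-written scan.
-- outside the precondition, e.g. on sliding([1, 2, 3], -1): A returns (0, 4), B raises IndexError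
import Mathlib
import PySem

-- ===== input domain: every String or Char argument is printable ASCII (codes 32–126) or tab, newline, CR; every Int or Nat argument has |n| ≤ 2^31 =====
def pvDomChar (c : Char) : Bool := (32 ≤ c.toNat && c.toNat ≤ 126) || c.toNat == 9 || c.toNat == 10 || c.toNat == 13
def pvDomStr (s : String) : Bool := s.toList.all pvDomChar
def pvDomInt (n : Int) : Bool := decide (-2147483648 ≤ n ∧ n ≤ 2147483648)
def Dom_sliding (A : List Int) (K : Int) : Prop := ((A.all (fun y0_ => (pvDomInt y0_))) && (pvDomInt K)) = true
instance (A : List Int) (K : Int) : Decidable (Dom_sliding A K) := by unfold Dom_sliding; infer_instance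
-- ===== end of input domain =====

-- B replaces A's O(n*K) re-summing of every slice by an O(n) running window sum and
-- replaces the hand-written max scan by max over the (count, sum) pair; return value only.

-- ===== PORT A =====
def sliding (A : List Int) (K : Int) : Int × Int :=
  let d : PySem.Dict Int Int :=
    (PySem.List.pyRange 0 (PySem.List.len A - K + 1) 1).foldl
      (fun d i =>
        let s := (PySem.List.slice A (some i) (some (i + K))).sum
        if d.contains s then d.modify s 0 (· + 1) else d.insert s 1)
      PySem.Dict.empty
  let st : Int × Option Int :=
    d.items.foldl
      (fun st kv =>
        if kv.2 > st.1 then (kv.2, some kv.1)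
        else if kv.2 = st.1 then
          match st.2 with
          | some tk => if kv.1 > tk then (st.1, some kv.1) else st
          | none => st   -- Python raises NameError here; unreachable under Pre_
        else st)
      (-1, none)
  match st with
  | (m, some tk) => (tk, m)
  | (m, none) => (0, m)   -- Python raises NameError here (no window); excluded by Pre_

-- ===== PORT B =====
def sliding_alt (A : List Int) (K : Int) : Int × Int :=
  let s0 := ((PySem.List.pyRange 0 K 1).map (fun i => (PySem.List.pyGet? A i).getD 0)).sum
  let st :=
    (PySem.List.pyRange 0 (PySem.List.len A - K) 1).foldl
      (fun (st : Int × PySem.Dict Int Int) i =>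
        let s := st.1 + ((PySem.List.pyGet? A (i + K)).getD 0 - (PySem.List.pyGet? A i).getD 0)
        (s, st.2.insert s (st.2.getD s 0 + 1)))
      (s0, PySem.Dict.empty.insert s0 1)
  match PySem.List.max2? st.2.items (fun kv => kv.2) (fun kv => kv.1) with
  | some kv => (kv.1, kv.2)
  | none => (0, 0)   -- max() on an empty dict; unreachable (counts always has a key)

-- ===== PRECONDITION & SPEC =====
-- Pre_ excludes K > len(A), where A raises NameError (no window is ever summed), and K < 0,
-- where A's value is an accident of Python's slice clamping on a negative window width
-- (B raises IndexError there).
def Pre_sliding (A : List Int) (K : Int) : Prop := 0 ≤ K ∧ K ≤ (A.length : Int)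
instance (A : List Int) (K : Int) : Decidable (Pre_sliding A K) := by unfold Pre_sliding; infer_instance
def pvWitness_sliding : List Int × Int := ([1, 2, 1], 2)

def Spec_sliding (A : List Int) (K : Int) (out : Int × Int) : Prop := out = sliding_alt A K
instance (A : List Int) (K : Int) (out : Int × Int) : Decidable (Spec_sliding A K out) := by unfold Spec_sliding; infer_instance

-- ===== CLAIM (what is proved, stated in full; the proofs are below) =====
def Claim_equal_sliding : Prop := ∀ (A : List Int) (K : Int), Dom_sliding A K → Pre_sliding A K → Spec_sliding A K (sliding A K)

-- ===== LEMMAS AND PROOFS =====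

-- sum of the width-k window starting at j
def wsum (A : List Int) (k j : Nat) : Int := ((A.drop j).take k).sum

-- the list of all window sums, starting positions 0 .. m-1
def wsums (A : List Int) (k m : Nat) : List Int := (List.range m).map (wsum A k)

lemma wsum_succ (A : List Int) (k j : Nat) (h : j + k < A.length) :
    wsum A k (j + 1) = wsum A k j + ((A[j + k]?).getD 0 - (A[j]?).getD 0) := by
  have hj : j < A.length := by omega
  cases k with
  | zero => simp [wsum]
  | succ t =>
    have hdrop : A[j] :: A.drop (j + 1) = A.drop j := List.getElem_cons_drop hj
    have h1 : (A.drop j).take (t + 1) = A[j] :: (A.drop (j + 1)).take t := by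
      rw [← hdrop, List.take_succ_cons]
    have h2 : (A.drop (j + 1)).take (t + 1)
        = (A.drop (j + 1)).take t ++ ((A.drop (j + 1))[t]?).toList := List.take_add_one
    have h3 : (A.drop (j + 1))[t]? = A[j + 1 + t]? := by
      rw [List.getElem?_drop]
    have h4 : A[j + 1 + t]? = some (A[j + 1 + t]'(by omega)) := List.getElem?_eq_getElem (by omega)
    have h5 : A[j]? = some (A[j]'hj) := List.getElem?_eq_getElem hj
    have hjk : j + (t + 1) = j + 1 + t := by omega
    simp [wsum, h1, h2, h3, hjk, h4, h5]
    ring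

-- A's dict update is the Counter update
lemma updA_eq :
    (fun (d : PySem.Dict Int Int) (s : Int) =>
      if d.contains s then d.modify s 0 (· + 1) else d.insert s 1)
    = (fun (d : PySem.Dict Int Int) (s : Int) => d.modify s 0 (· + 1)) := by
  funext d s
  by_cases h : d.contains s
  · simp [h]
  · rw [if_neg h, PySem.Dict.modify, PySem.Dict.getD_of_not_contains d 0 (by simpa using h), zero_add]

-- A's counting loop builds the Counter of all window sums
lemma dictA_eq (A : List Int) (K : Int) (h0 : 0 ≤ K) (h1 : K ≤ (A.length : Int)) :
    ((PySem.List.pyRange 0 (PySem.List.len A - K + 1) 1).foldl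
      (fun d i =>
        let s := (PySem.List.slice A (some i) (some (i + K))).sum
        if d.contains s then d.modify s 0 (· + 1) else d.insert s 1)
      PySem.Dict.empty)
    = PySem.Dict.counter (wsums A K.toNat (A.length - K.toNat + 1)) := by
  have hK : K = (K.toNat : Int) := (Int.toNat_of_nonneg h0).symm
  rw [PySem.List.len_eq, hK, PySem.List.pyRange_one]
  have hM : ((A.length : Int) - (K.toNat : Int) + 1 - 0).toNat = A.length - K.toNat + 1 := by omega
  rw [hM, List.foldl_map, PySem.Dict.counter_eq_foldl, wsums, List.foldl_map]
  congr 1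
  funext d j
  simp only [zero_add, PySem.List.slice_natCast_add]
  exact congrFun (congrFun updA_eq d) _

-- B's loop state after the first m steps
lemma foldB_eq (A : List Int) (k : Nat) (hk : k ≤ A.length) (m : Nat) (hm : m ≤ A.length - k) :
    ((PySem.List.pyRange 0 (m : Int) 1).foldl
      (fun (st : Int × PySem.Dict Int Int) i =>
        let s := st.1 + ((PySem.List.pyGet? A (i + (k : Int))).getD 0 - (PySem.List.pyGet? A i).getD 0)
        (s, st.2.insert s (st.2.getD s 0 + 1)))
      (wsum A k 0, PySem.Dict.empty.insert (wsum A k 0) 1))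
    = (wsum A k m, PySem.Dict.counter (wsums A k (m + 1))) := by
  induction m with
  | zero =>
    rw [PySem.List.pyRange_one_eq_nil (by norm_num)]
    simp [wsums, PySem.Dict.counter_eq_foldl, PySem.Dict.modify, PySem.Dict.getD_empty]
  | succ m ih =>
    have hm' : m ≤ A.length - k := by omega
    have hcast : ((m + 1 : Nat) : Int) = (m : Int) + 1 := by push_cast; ring
    rw [hcast, PySem.List.pyRange_one_succ_right (by positivity), List.foldl_append,
        ih hm', List.foldl_cons, List.foldl_nil]
    have hidx : m + k < A.length := by omega
    have hg1 : PySem.List.pyGet? A ((m : Int) + (k : Int)) = A[m + k]? := by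
      rw [show ((m : Int) + (k : Int)) = ((m + k : Nat) : Int) by push_cast; ring,
          PySem.List.pyGet?_natCast]
    have hg2 : PySem.List.pyGet? A (m : Int) = A[m]? := PySem.List.pyGet?_natCast A m
    simp only [hg1, hg2]
    have hs : wsum A k m + ((A[m + k]?).getD 0 - (A[m]?).getD 0) = wsum A k (m + 1) :=
      (wsum_succ A k m hidx).symm
    rw [hs]
    have hws : wsums A k (m + 1 + 1) = wsums A k (m + 1) ++ [wsum A k (m + 1)] := by
      simp [wsums, List.range_succ]
    rw [hws, PySem.Dict.counter_append_singleton, PySem.Dict.modify]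

-- the fold step of PySem.List.max2? at our key functions, as a named definition
def stepM (acc : Option (Int × Int)) (x : Int × Int) : Option (Int × Int) :=
  match acc with
  | none => some x
  | some mm =>
    if (decide (mm.2 < x.2) || !decide (x.2 < mm.2) && decide (mm.1 < x.1)) = true
    then some x else some mm

lemma max2?_eq_foldl (l : List (Int × Int)) :
    PySem.List.max2? l (fun kv => kv.2) (fun kv => kv.1) = l.foldl stepM none := by
  unfold PySem.List.max2?
  congr 1
  funext acc x
  cases acc <;> rfl

-- the two maximum-selection loops agree once both accumulators are seeded
lemma select_eq (l : List (Int × Int)) :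
    ∀ (m tk : Int), ∃ m' tk',
      (l.foldl
        (fun st kv =>
          if kv.2 > st.1 then (kv.2, some kv.1)
          else if kv.2 = st.1 then
            match st.2 with
            | some tk => if kv.1 > tk then (st.1, some kv.1) else st
            | none => st
          else st)
        (m, some tk) : Int × Option Int)
      = (m', some tk')
      ∧ (l.foldl stepM (some (tk, m)) : Option (Int × Int)) = some (tk', m') := by
  induction l with
  | nil => exact fun m tk => ⟨m, tk, rfl, rfl⟩
  | cons x t ih =>
    intro m tk
    simp only [List.foldl_cons]
    by_cases h1 : x.2 > m
    · have eA : (if x.2 > m then ((x.2, some x.1) : Int × Option Int)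
          else if x.2 = m then
            match (some tk : Option Int) with
            | some tk => if x.1 > tk then (m, some x.1) else (m, some tk)
            | none => (m, some tk)
          else (m, some tk)) = (x.2, some x.1) := if_pos h1
      have eM : stepM (some (tk, m)) x = some (x.1, x.2) := by
        simp [stepM, h1]
      rw [eA, eM]
      exact ih x.2 x.1
    · by_cases h2 : x.2 = m
      · subst h2
        by_cases h3 : x.1 > tk
        · have eA : (if x.2 > x.2 then ((x.2, some x.1) : Int × Option Int)
              else if x.2 = x.2 then
                match (some tk : Option Int) with
                | some tk => if x.1 > tk then (x.2, some x.1) else (x.2, some tk)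
                | none => (x.2, some tk)
              else (x.2, some tk)) = (x.2, some x.1) := by
            simp [h3]
          have eM : stepM (some (tk, x.2)) x = some (x.1, x.2) := by
            simp [stepM, h3]
          rw [eA, eM]
          exact ih x.2 x.1
        · have eA : (if x.2 > x.2 then ((x.2, some x.1) : Int × Option Int)
              else if x.2 = x.2 then
                match (some tk : Option Int) with
                | some tk => if x.1 > tk then (x.2, some x.1) else (x.2, some tk)
                | none => (x.2, some tk)
              else (x.2, some tk)) = (x.2, some tk) := by
            simp [h3]
          have eM : stepM (some (tk, x.2)) x = some (tk, x.2) := by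
            simp [stepM, h3]
          rw [eA, eM]
          exact ih x.2 tk
      · have eA : (if x.2 > m then ((x.2, some x.1) : Int × Option Int)
            else if x.2 = m then
              match (some tk : Option Int) with
              | some tk => if x.1 > tk then (m, some x.1) else (m, some tk)
              | none => (m, some tk)
            else (m, some tk)) = (m, some tk) := by
          simp [h1, h2]
        have eM : stepM (some (tk, m)) x = some (tk, m) := by
          have : x.2 < m := by omega
          simp [stepM, h1, this]
        rw [eA, eM]
        exact ih m tk

-- the whole selection phase: A's scan over the items equals B's max over (count, key)
lemma select_full (l : List (Int × Int)) (hne : l ≠ []) (hpos : ∀ p ∈ l, 0 < p.2) :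
    (match l.foldl
        (fun st kv =>
          if kv.2 > st.1 then (kv.2, some kv.1)
          else if kv.2 = st.1 then
            match st.2 with
            | some tk => if kv.1 > tk then (st.1, some kv.1) else st
            | none => st
          else st)
        ((-1 : Int), (none : Option Int)) with
     | (m, some tk) => ((tk, m) : Int × Int)
     | (m, none) => (0, m))
    = (match PySem.List.max2? l (fun kv => kv.2) (fun kv => kv.1) with
       | some kv => ((kv.1, kv.2) : Int × Int)
       | none => (0, 0)) := by
  cases l with
  | nil => exact absurd rfl hne
  | cons x t =>
    have hx : 0 < x.2 := hpos x (List.mem_cons_self ..)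
    rw [max2?_eq_foldl]
    simp only [List.foldl_cons]
    have eM0 : stepM none x = some x := rfl
    rw [eM0]
    have eA : (if x.2 > (-1 : Int) then ((x.2, some x.1) : Int × Option Int)
        else if x.2 = -1 then
          match (none : Option Int) with
          | some tk => if x.1 > tk then (-1, some x.1) else (-1, none)
          | none => (-1, none)
        else (-1, none)) = (x.2, some x.1) := if_pos (by omega)
    rw [eA]
    obtain ⟨m', tk', hA, hM⟩ := select_eq t x.2 x.1
    rw [show (some (x.1, x.2) : Option (Int × Int)) = some x from rfl] at hM
    rw [hA, hM]

-- the seed sum over range(K) is the first window sum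
lemma sum_range_get (A : List Int) (k : Nat) (hk : k ≤ A.length) :
    ((List.range k).map (fun j => (A[j]?).getD 0)).sum = (A.take k).sum := by
  induction k with
  | zero => simp
  | succ k ih =>
    rw [List.range_succ, List.map_append, List.sum_append, ih (by omega),
        List.take_add_one, List.sum_append]
    simp [List.getElem?_eq_getElem (show k < A.length by omega)]

theorem sliding_spec : Claim_equal_sliding := by
  intro A K _ hpre
  obtain ⟨h0, h1⟩ := hpre
  show sliding A K = sliding_alt A K
  simp only [sliding, sliding_alt]
  rw [dictA_eq A K h0 h1]
  have hK : K = (K.toNat : Int) := (Int.toNat_of_nonneg h0).symm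
  set k := K.toNat with hkdef
  have hkle : k ≤ A.length := by omega
  rw [hK]
  have hs0 : (((PySem.List.pyRange 0 (k : Int) 1).map (fun i => (PySem.List.pyGet? A i).getD 0)).sum : Int) = wsum A k 0 := by
    rw [PySem.List.pyRange_one, List.map_map, wsum, List.drop_zero,
        show ((k : Int) - 0).toNat = k by omega, ← sum_range_get A k hkle]
    congr 1
    refine List.map_congr_left (fun j hj => ?_)
    simp [PySem.List.pyGet?_natCast]
  have hrange : PySem.List.len A - (k : Int) = ((A.length - k : Nat) : Int) := by
    rw [PySem.List.len_eq]; omega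
  rw [hs0, hrange, foldB_eq A k hkle (A.length - k) le_rfl]
  apply select_full
  · have hmem0 : wsum A k 0 ∈ wsums A k (A.length - k + 1) :=
      List.mem_map.mpr ⟨0, List.mem_range.mpr (by omega), rfl⟩
    rw [PySem.Dict.items_counter]
    intro h
    rcases List.map_eq_nil_iff.mp h with h'
    exact absurd ((PySem.Set.mem_ofList _ _).mpr hmem0) (by simp [h'])
  · intro p hp
    rw [PySem.Dict.items_counter] at hp
    obtain ⟨key, hkey, rfl⟩ := List.mem_map.mp hp
    have : key ∈ wsums A k (A.length - k + 1) := (PySem.Set.mem_ofList _ _).mp hkey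
    simpa using List.count_pos_iff.mpr this
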